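-- pv_equiv track=rewrite | github.com/tamaraalil/Class-Scheduler | 3760-102/search.py | level_search
-- ===== SOURCE A (Python) =====
-- def level_search(path, courses):
--     """automatically get all the levels"""
--     all_course_paths = []
--
--     for level in range(1, 10):
--         for course in courses:
--             if level == int(course[1]):
--                 course_path = path + '/' + course
--                 all_course_paths.append(course_path)
--
--                 # findCourses(coursePath)
--
--     return all_course_paths
-- ===== SOURCE B (Python) =====
-- def level_search(path, courses):
--     """automatically get all the levels"""
--     buckets = {}
--     for course in courses:
--         buckets.setdefault(int(course[1]), []).append(course)
--
--     all_course_paths = []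
--     for level in range(1, 10):
--         for course in buckets.get(level, []):
--             all_course_paths.append(path + '/' + course)
--     return all_course_paths
-- ===== Notes on version B (the rewrite author's own statement) =====
-- stated objective: faster
-- what changed: One grouping pass builds a dict from int(course[1]) to the courses in encounter order, then levels 1..9 are emitted from their buckets, replacing A's nine full rescans of the course list.
-- outside the precondition, e.g. on level_search('p', ['ax']): A raises ValueError, B raises ValueError; on level_search('p', ['']): A raises IndexError, B raises IndexError
import Mathlib
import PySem

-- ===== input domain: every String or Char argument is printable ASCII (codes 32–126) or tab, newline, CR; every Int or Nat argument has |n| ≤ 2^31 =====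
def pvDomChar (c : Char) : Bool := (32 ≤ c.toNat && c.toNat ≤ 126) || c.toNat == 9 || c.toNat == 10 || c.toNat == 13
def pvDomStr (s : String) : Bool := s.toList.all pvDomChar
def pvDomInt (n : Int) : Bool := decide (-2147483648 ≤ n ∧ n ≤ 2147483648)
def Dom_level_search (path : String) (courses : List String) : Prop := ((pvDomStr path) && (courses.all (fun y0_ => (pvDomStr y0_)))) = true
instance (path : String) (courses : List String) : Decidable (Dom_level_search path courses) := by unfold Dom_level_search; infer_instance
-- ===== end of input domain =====

-- B groups courses by int(course[1]) in one pass instead of A's nine rescans of the list; return values proved equal on Pre_.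

-- shared helper: int(course[1]) — none exactly where Python raises (IndexError / ValueError)
def pvKey (course : String) : Option Int :=
  match PySem.Str.pyGet? course 1 with
  | some ch => PySem.Int.ofChars? [ch]
  | none => none

-- ===== PORT A =====
def level_search (path : String) (courses : List String) : List String :=
  (PySem.List.pyRange 1 10 1).foldl (fun acc level =>
    courses.foldl (fun acc course =>
      if pvKey course == some level then acc ++ [path ++ "/" ++ course] else acc) acc) []

-- ===== PORT B =====
def level_search_alt (path : String) (courses : List String) : List String :=
  let buckets : PySem.Dict Int (List String) :=
    courses.foldl (fun d course =>
      match pvKey course with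
      | some k => d.modify k [] (fun b => b ++ [course])
      | none => d) PySem.Dict.empty
  (PySem.List.pyRange 1 10 1).foldl (fun acc level =>
    acc ++ (buckets.getD level []).map (fun course => path ++ "/" ++ course)) []

-- ===== PRECONDITION & SPEC =====
-- Pre_: every course has a second character and it parses as an int (else A raises IndexError/ValueError)
def Pre_level_search (path : String) (courses : List String) : Prop :=
  ∀ course ∈ courses, (pvKey course).isSome = true
instance (path : String) (courses : List String) : Decidable (Pre_level_search path courses) := by unfold Pre_level_search; infer_instance
def pvWitness_level_search : String × List String := ("p", ["a1", "b2", "c1"])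
def Spec_level_search (path : String) (courses : List String) (out : List String) : Prop := out = level_search_alt path courses
instance (path : String) (courses : List String) (out : List String) : Decidable (Spec_level_search path courses out) := by unfold Spec_level_search; infer_instance

-- ===== CLAIM (what is proved, stated in full; the proofs are below) =====
def Claim_equal_level_search : Prop := ∀ (path : String) (courses : List String), Dom_level_search path courses → Pre_level_search path courses → Spec_level_search path courses (level_search path courses)

-- ===== LEMMAS AND PROOFS =====

-- the grouping fold's bucket at `lvl` is the filtered sublist, provided every key parses
theorem pv_bucket_eq (courses : List String) (d0 : PySem.Dict Int (List String))
    (h : ∀ course ∈ courses, (pvKey course).isSome = true) (lvl : Int) :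
    (courses.foldl (fun d course =>
      match pvKey course with
      | some k => d.modify k [] (fun b => b ++ [course])
      | none => d) d0).getD lvl []
    = d0.getD lvl [] ++ courses.filter (fun c => pvKey c == some lvl) := by
  induction courses generalizing d0 with
  | nil => simp
  | cons c cs ih =>
    have hc : (pvKey c).isSome = true := h c (by simp)
    obtain ⟨k, hk⟩ := Option.isSome_iff_exists.mp hc
    simp only [List.foldl_cons, hk, List.filter_cons]
    rw [ih _ (fun x hx => h x (by simp [hx]))]
    by_cases hkl : k = lvl
    · subst hkl
      rw [PySem.Dict.getD_modify_self]
      simp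
    · rw [PySem.Dict.getD_modify, if_neg (fun e : lvl = k => hkl e.symm)]
      simp [hkl]

theorem pv_inner_eq (path : String) (courses : List String) (lvl : Int) (acc : List String) :
    courses.foldl (fun acc course =>
      if pvKey course == some lvl then acc ++ [path ++ "/" ++ course] else acc) acc
    = acc ++ (courses.filter (fun c => pvKey c == some lvl)).map (fun course => path ++ "/" ++ course) := by
  induction courses generalizing acc with
  | nil => simp
  | cons c cs ih =>
    simp only [List.foldl_cons, List.filter_cons]
    by_cases hc : (pvKey c == some lvl) = true
    · rw [if_pos hc, ih]
      simp [hc]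
    · rw [if_neg hc, ih]
      simp [hc]

-- ===== VERDICT (by name: the statement is the Claim_ definition above) =====
theorem level_search_spec : Claim_equal_level_search := by
  intro path courses _ hpre
  unfold Spec_level_search level_search level_search_alt
  simp only [pv_inner_eq, pv_bucket_eq courses PySem.Dict.empty hpre,
    PySem.Dict.getD_empty, List.nil_append]
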